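-- pv_equiv track=rewrite | github.com/Aochong-Li/inception | src/utils/chunk.py | deprecated_chunk
-- ===== SOURCE A (Python) =====
-- def deprecated_chunk(reasoning: str, granularity: int = 30):
--     """
--     Chunk the reasoning into smaller chunks.
--     """
--     chunks = reasoning.split('\n\n')
--     masks = [len(chunk.split()) > granularity for chunk in chunks]
--
--     # Step 1: chunk the sequence into small chunks
--     merged, buffer = [], []
--     for c, m in zip(chunks, masks):
--         if not m:
--             buffer.append(c)
--         else:
--             if buffer:
--                 merged.append('\n\n'.join(buffer))
--                 buffer.clear()
--             merged.append(c)
--     if buffer: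
--         merged.append('\n\n'.join(buffer))
--
--     # Step 2: merge small chunks to big chunks
--     super_chunks, current = [], None
--     for c in merged:
--         if len(c.split()) > granularity:
--             if current is not None:
--                 super_chunks.append(current)
--             current = c
--         else:
--             if current is None:
--                 current = c
--             else:
--                 current += '\n\n' + c
--
--     if current is not None:
--         super_chunks.append(current)
--
--     return super_chunks
-- ===== SOURCE B (Python) =====
-- def deprecated_chunk(reasoning: str, granularity: int = 30):
--     """Single fused pass: buffer consecutive small paragraphs; each finalized
--     element (joined small-run or big paragraph) is routed straight into the
--     super-chunk accumulator."""
--     supers = []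
--     current = None
--     buffer = []
--
--     def feed(c):
--         nonlocal current
--         if len(c.split()) > granularity:
--             if current is not None:
--                 supers.append(current)
--             current = c
--         else:
--             current = c if current is None else current + '\n\n' + c
--
--     for c in reasoning.split('\n\n'):
--         if len(c.split()) > granularity:
--             if buffer:
--                 feed('\n\n'.join(buffer))
--                 buffer = []
--             feed(c)
--         else:
--             buffer.append(c)
--     if buffer:
--         feed('\n\n'.join(buffer))
--     if current is not None:
--         supers.append(current)
--     return supers
-- ===== Notes on version B (the rewrite author's own statement) =====
-- stated objective: alternative
-- what changed: Fused A's two passes (build the merged list, then fold it into super-chunks) into one streaming loop over the paragraphs that routes each finalized element (joined small-run or big paragraph) directly into the super-chunk accumulator, never materializing the intermediate merged list.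
import Mathlib
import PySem

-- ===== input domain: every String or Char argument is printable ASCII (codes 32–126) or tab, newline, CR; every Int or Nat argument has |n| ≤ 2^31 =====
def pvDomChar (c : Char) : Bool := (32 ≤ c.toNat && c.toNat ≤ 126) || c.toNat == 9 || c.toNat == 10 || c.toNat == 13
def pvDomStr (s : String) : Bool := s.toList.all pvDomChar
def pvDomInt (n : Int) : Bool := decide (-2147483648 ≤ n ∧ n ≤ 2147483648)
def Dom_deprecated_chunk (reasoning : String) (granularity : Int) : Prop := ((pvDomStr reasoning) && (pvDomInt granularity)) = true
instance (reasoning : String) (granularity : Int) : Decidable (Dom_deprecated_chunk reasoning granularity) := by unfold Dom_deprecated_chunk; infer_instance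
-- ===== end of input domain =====

-- B fuses A's two passes into one streaming loop (alternative decomposition, same cost).

-- word count: len(c.split())
def pvWC (c : String) : Int := ((PySem.Str.split₀ c).length : Int)

-- ===== PORT A =====
-- Step-1 loop body: route (chunk, mask) into (merged, buffer)
def pvStepA1 (acc : List String × List String) (cm : String × Bool) : List String × List String :=
  if !cm.2 then (acc.1, acc.2 ++ [cm.1])
  else
    let merged := if acc.2 ≠ [] then acc.1 ++ [PySem.Str.join "\n\n" acc.2] else acc.1
    (merged ++ [cm.1], [])

-- Step-2 loop body: route a merged element into (super_chunks, current)
def pvStepA2 (g : Int) (acc : List String × Option String) (c : String) : List String × Option String :=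
  if pvWC c > g then
    match acc.2 with
    | some cur => (acc.1 ++ [cur], some c)
    | none => (acc.1, some c)
  else
    match acc.2 with
    | none => (acc.1, some c)
    | some cur => (acc.1, some (cur ++ "\n\n" ++ c))

def deprecated_chunk (reasoning : String) (granularity : Int) : List String :=
  let chunks := (PySem.Str.split? reasoning "\n\n").getD []
  let masks := chunks.map (fun chunk => decide (pvWC chunk > granularity))
  let mb := (chunks.zip masks).foldl pvStepA1 ([], [])
  let merged := if mb.2 ≠ [] then mb.1 ++ [PySem.Str.join "\n\n" mb.2] else mb.1
  let sc := merged.foldl (pvStepA2 granularity) ([], none)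
  match sc.2 with
  | some cur => sc.1 ++ [cur]
  | none => sc.1

-- ===== PORT B =====
-- Source B's feed(): route one finalized element into (supers, current)
def pvFeed (g : Int) (acc : List String × Option String) (c : String) : List String × Option String :=
  if pvWC c > g then
    match acc.2 with
    | some cur => (acc.1 ++ [cur], some c)
    | none => (acc.1, some c)
  else
    match acc.2 with
    | none => (acc.1, some c)
    | some cur => (acc.1, some (cur ++ "\n\n" ++ c))

-- Source B's fused loop body over state (supers, current, buffer)
def pvStepB (g : Int) (st : List String × Option String × List String) (c : String) :
    List String × Option String × List String :=
  if pvWC c > g then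
    let sc1 := if st.2.2 ≠ [] then pvFeed g (st.1, st.2.1) (PySem.Str.join "\n\n" st.2.2) else (st.1, st.2.1)
    let sc2 := pvFeed g sc1 c
    (sc2.1, sc2.2, ([] : List String))
  else (st.1, st.2.1, st.2.2 ++ [c])

def deprecated_chunk_alt (reasoning : String) (granularity : Int) : List String :=
  let chunks := (PySem.Str.split? reasoning "\n\n").getD []
  let st := chunks.foldl (pvStepB granularity) ([], none, [])
  let sc := if st.2.2 ≠ [] then pvFeed granularity (st.1, st.2.1) (PySem.Str.join "\n\n" st.2.2) else (st.1, st.2.1)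
  match sc.2 with
  | some cur => sc.1 ++ [cur]
  | none => sc.1

-- ===== PRECONDITION & SPEC =====
def Spec_deprecated_chunk (reasoning : String) (granularity : Int) (out : List String) : Prop := out = deprecated_chunk_alt reasoning granularity
instance (reasoning : String) (granularity : Int) (out : List String) : Decidable (Spec_deprecated_chunk reasoning granularity out) := by unfold Spec_deprecated_chunk; infer_instance

-- ===== CLAIM (what is proved, stated in full; the proofs are below) =====
def Claim_equal_deprecated_chunk : Prop := ∀ (reasoning : String) (granularity : Int), Dom_deprecated_chunk reasoning granularity → Spec_deprecated_chunk reasoning granularity (deprecated_chunk reasoning granularity)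

-- ===== LEMMAS AND PROOFS =====

-- what a big chunk emits into `merged` given the pending buffer
def pvEmit (buf : List String) (c : String) : List String :=
  (if buf ≠ [] then [PySem.Str.join "\n\n" buf] else []) ++ [c]

-- step-1 body over plain chunks (mask computed inline)
def pvS1 (g : Int) (acc : List String × List String) (c : String) : List String × List String :=
  if pvWC c > g then (acc.1 ++ pvEmit acc.2 c, []) else (acc.1, acc.2 ++ [c])

theorem pvFeed_eq_stepA2 : pvFeed = pvStepA2 := rfl

theorem zipMap_foldl (g : Int) (l : List String) (init : List String × List String) :
    (l.zip (l.map (fun c => decide (pvWC c > g)))).foldl pvStepA1 init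
      = l.foldl (pvS1 g) init := by
  induction l generalizing init with
  | nil => rfl
  | cons c cs ih =>
    simp only [List.map_cons, List.zip_cons_cons, List.foldl_cons, ih]
    congr 1
    by_cases h : pvWC c > g <;>
      by_cases hbuf : init.2 = ([] : List String) <;> simp [pvStepA1, pvS1, pvEmit, h, hbuf]

theorem s1_prefix (g : Int) (cs : List String) (buf m0 : List String) :
    cs.foldl (pvS1 g) (m0, buf)
      = (m0 ++ (cs.foldl (pvS1 g) ([], buf)).1, (cs.foldl (pvS1 g) ([], buf)).2) := by
  induction cs generalizing buf m0 with
  | nil => simp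
  | cons c cs ih =>
    simp only [List.foldl_cons]
    by_cases h : pvWC c > g
    · simp only [pvS1, if_pos h]
      rw [ih ([]) (m0 ++ pvEmit buf c), ih ([]) ([] ++ pvEmit buf c)]
      simp
    · simp only [pvS1, if_neg h]
      exact ih (buf ++ [c]) m0

theorem emit_foldl (g : Int) (s : List String) (cur : Option String) (buf : List String) (c : String) :
    (pvEmit buf c).foldl (pvFeed g) (s, cur)
      = pvFeed g (if buf ≠ [] then pvFeed g (s, cur) (PySem.Str.join "\n\n" buf) else (s, cur)) c := by
  by_cases hb : buf = [] <;> simp [pvEmit, hb]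

theorem fused_invariant (g : Int) (cs : List String) (s : List String) (cur : Option String)
    (buf : List String) :
    cs.foldl (pvStepB g) (s, cur, buf)
      = (((cs.foldl (pvS1 g) ([], buf)).1.foldl (pvFeed g) (s, cur)).1,
         ((cs.foldl (pvS1 g) ([], buf)).1.foldl (pvFeed g) (s, cur)).2,
         (cs.foldl (pvS1 g) ([], buf)).2) := by
  induction cs generalizing s cur buf with
  | nil => simp
  | cons c cs ih =>
    simp only [List.foldl_cons]
    by_cases h : pvWC c > g
    · simp only [pvStepB, if_pos h, pvS1]
      rw [ih, s1_prefix g cs ([]) ([] ++ pvEmit buf c)]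
      simp only [List.nil_append, List.foldl_append, ← emit_foldl]
    · simp only [pvStepB, if_neg h, pvS1]
      exact ih s cur (buf ++ [c])

-- both ports, factored over the already-split chunk list
theorem ports_agree (g : Int) (chunks : List String) :
    (let masks := chunks.map (fun chunk => decide (pvWC chunk > g))
     let mb := (chunks.zip masks).foldl pvStepA1 ([], [])
     let merged := if mb.2 ≠ [] then mb.1 ++ [PySem.Str.join "\n\n" mb.2] else mb.1
     let sc := merged.foldl (pvStepA2 g) ([], none)
     match sc.2 with
     | some cur => sc.1 ++ [cur]
     | none => sc.1)
    = (let st := chunks.foldl (pvStepB g) ([], none, [])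
       let sc := if st.2.2 ≠ [] then pvFeed g (st.1, st.2.1) (PySem.Str.join "\n\n" st.2.2) else (st.1, st.2.1)
       match sc.2 with
       | some cur => sc.1 ++ [cur]
       | none => sc.1) := by
  simp only
  rw [zipMap_foldl, fused_invariant g chunks ([]) none ([]), ← pvFeed_eq_stepA2]
  set r := chunks.foldl (pvS1 g) ([], []) with hr
  by_cases hb : r.2 = []
  · simp [hb]
  · simp [hb, List.foldl_append]

-- ===== VERDICT (by name: the statement is the Claim_ definition above) =====
theorem deprecated_chunk_spec : Claim_equal_deprecated_chunk := by
  intro reasoning g _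
  exact ports_agree g ((PySem.Str.split? reasoning "\n\n").getD [])
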